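-- pv_equiv track=rewrite | github.com/Kappaprideer/ASD | Grafy/Cwiczenia_9/Zad2_(dobry_początek).py | good_beginning
-- ===== SOURCE A (Python) =====
-- def DFS_visit(G,visited,s):
--     visited[s]=1
--     for u in G[s]:
--         if visited[u]==0:
--             DFS_visit(G,visited,u)
--
-- def good_beginning(G):
--     kandydat=0
--     n=len(G)
--     visited=[0 for _ in range(n)]
--     for i in range(n):
--         if visited[i]==0:
--             kandydat=i
--             DFS_visit(G,visited,i)
--
--     visited=[0 for _ in range(n)]
--     DFS_visit(G,visited,kandydat)
--     for x in visited:
--         if x==0: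
--             return None
--     return kandydat
-- ===== SOURCE B (Python) =====
-- def good_beginning(G):
--     n = len(G)
--     visited = [0] * n
--     kandydat = 0
--     for i in range(n):
--         if visited[i] == 0:
--             kandydat = i
--             _mark_from(G, visited, i)
--     visited = [0] * n
--     _mark_from(G, visited, kandydat)
--     return None if 0 in visited else kandydat
--
--
-- def _mark_from(G, visited, start):
--     # iterative DFS with an explicit stack (no recursion)
--     stack = [start]
--     while stack:
--         v = stack.pop()
--         if visited[v] == 0:
--             visited[v] = 1
--             for u in G[v]:
--                 if visited[u] == 0:
--                     stack.append(u)
-- ===== Notes on version B (the rewrite author's own statement) =====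
-- stated objective: alternative
-- what changed: Replaces the recursive DFS helper with an iterative explicit-stack DFS (pop-and-mark loop pushing unvisited neighbours), keeping the two-pass mother-vertex strategy; the final check becomes a membership test.
import Mathlib
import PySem

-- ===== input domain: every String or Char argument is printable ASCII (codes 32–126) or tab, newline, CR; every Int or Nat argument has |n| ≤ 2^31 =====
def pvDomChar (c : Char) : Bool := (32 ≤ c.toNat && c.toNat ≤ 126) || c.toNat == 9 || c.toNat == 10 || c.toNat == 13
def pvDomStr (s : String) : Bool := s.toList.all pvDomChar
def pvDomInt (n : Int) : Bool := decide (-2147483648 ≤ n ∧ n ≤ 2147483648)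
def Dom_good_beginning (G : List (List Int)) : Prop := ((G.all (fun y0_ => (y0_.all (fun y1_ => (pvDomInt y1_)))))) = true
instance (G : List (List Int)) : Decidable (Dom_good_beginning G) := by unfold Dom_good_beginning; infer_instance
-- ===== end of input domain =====

-- B replaces A's recursive DFS helper by an iterative explicit-stack DFS, keeping the two-pass
-- mother-vertex strategy; equivalence is about the return value (both Pythons mutate only locals).

-- ===== PORT A =====
-- Shared indexing primitives (Python's visited[v] / G[v] with negative-index wraparound; an
-- out-of-range access is an IndexError in Python — excluded by Pre_ — and here reads as
-- "already visited" (1) resp. an empty row; an out-of-range write is a no-op).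
def vget (vis : List Int) (v : Int) : Int := (PySem.List.pyGet? vis v).getD 1
def vset (vis : List Int) (v : Int) : List Int := PySem.List.pySetD vis v 1
def rowOf (G : List (List Int)) (v : Int) : List Int := (PySem.List.pyGet? G v).getD []

-- number of unvisited cells: fuel bound for A's recursion, termination measure for B's loop
def zeros (vis : List Int) : Nat := vis.countP (fun x => x == 0)

-- DFS_visit with a fuel totality guard (Python's recursion depth is bounded by the number of
-- unvisited vertices, so fuel = n is never exhausted on inputs satisfying Pre_).
def DFS_visitF (G : List (List Int)) : Nat → List Int → Int → List Int
  | 0, vis, _ => vis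
  | fuel+1, vis, s =>
      (rowOf G s).foldl
        (fun vis u => if vget vis u = 0 then DFS_visitF G fuel vis u else vis)
        (vset vis s)

-- A's final loop: "for x in visited: if x == 0: return None" then "return kandydat"
def loopNone (vis : List Int) (k : Int) : Option Int :=
  match vis with
  | [] => some k
  | x :: rest => if x = 0 then none else loopNone rest k

def good_beginning (G : List (List Int)) : Option Int :=
  let n := G.length
  let st := (List.range n).foldl
      (fun (p : Int × List Int) (i : Nat) =>
        if vget p.2 (i : Int) = 0 then (((i : Nat) : Int), DFS_visitF G n p.2 (i : Int)) else p)
      ((0 : Int), List.replicate n (0 : Int))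
  let vis2 := DFS_visitF G n (List.replicate n (0 : Int)) st.1
  loopNone vis2 st.1

-- ===== PORT B =====
-- termination lemma for B's stack loop: popping an unvisited vertex marks it
theorem zeros_set_lt : ∀ (vis : List Int) (k : Nat), vis[k]? = some 0 →
    zeros (vis.set k 1) < zeros vis := by
  intro vis
  induction vis with
  | nil => intro k hk; simp at hk
  | cons a t ih =>
    intro k hk
    cases k with
    | zero =>
      simp at hk
      subst hk
      simp [zeros]
    | succ k =>
      simp only [List.getElem?_cons_succ] at hk
      have := ih k hk
      simp only [List.set_cons_succ, zeros, List.countP_cons]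
      unfold zeros at this
      omega

theorem zeros_vset_lt (vis : List Int) (v : Int) (h : vget vis v = 0) :
    zeros (vset vis v) < zeros vis := by
  unfold vget PySem.List.pyGet? at h
  unfold vset PySem.List.pySetD PySem.List.pySet?
  cases hidx : PySem.List.pyIdx? vis.length v with
  | none => rw [hidx] at h; simp at h
  | some k =>
    rw [hidx] at h
    simp only [Option.bind_some] at h
    simp only [Option.map_some, Option.getD_some]
    cases hk : vis[k]? with
    | none => rw [hk] at h; simp at h
    | some a =>
      rw [hk] at h
      simp only [Option.getD_some] at h
      subst h
      exact zeros_set_lt vis k hk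

-- the while-stack loop of B's _mark_from (stack top = list head; Python pushes at the end and
-- pops from the end, so this list is Python's stack reversed: pushed-last, popped-first)
def markFrom (G : List (List Int)) (vis : List Int) (stack : List Int) : List Int :=
  match stack with
  | [] => vis
  | v :: rest =>
      if vget vis v = 0 then
        markFrom G (vset vis v)
          ((rowOf G v).foldl (fun st u => if vget (vset vis v) u = 0 then u :: st else st) rest)
      else
        markFrom G vis rest
termination_by (zeros vis, stack.length)
decreasing_by
  · exact Prod.Lex.left _ _ (zeros_vset_lt vis v (by assumption))
  · exact Prod.Lex.right _ (Nat.lt_succ_self _)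

def good_beginning_alt (G : List (List Int)) : Option Int :=
  let n := G.length
  let st := (List.range n).foldl
      (fun (p : Int × List Int) (i : Nat) =>
        if vget p.2 (i : Int) = 0 then (((i : Nat) : Int), markFrom G p.2 [(i : Int)]) else p)
      ((0 : Int), List.replicate n (0 : Int))
  let vis2 := markFrom G (List.replicate n (0 : Int)) [st.1]
  if vis2.contains 0 then none else some st.1

-- ===== PRECONDITION & SPEC =====
-- Pre_ is exactly the set of inputs on which Python A returns: A raises IndexError on the
-- empty graph and whenever some adjacency entry lies outside [-n, n).
def Pre_good_beginning (G : List (List Int)) : Prop :=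
  G ≠ [] ∧ ∀ r ∈ G, ∀ u ∈ r, -(G.length : Int) ≤ u ∧ u < (G.length : Int)
instance (G : List (List Int)) : Decidable (Pre_good_beginning G) := by
  unfold Pre_good_beginning; infer_instance
def pvWitness_good_beginning : List (List Int) := [[1], [0]]

def Spec_good_beginning (G : List (List Int)) (out : Option Int) : Prop := out = good_beginning_alt G
instance (G : List (List Int)) (out : Option Int) : Decidable (Spec_good_beginning G out) := by unfold Spec_good_beginning; infer_instance

-- ===== CLAIM (what is proved, stated in full; the proofs are below) =====
def Claim_equal_good_beginning : Prop := ∀ (G : List (List Int)), Dom_good_beginning G → Pre_good_beginning G → Spec_good_beginning G (good_beginning G)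

-- ===== LEMMAS AND PROOFS =====

def toIx (n : Nat) (v : Int) : Nat := (PySem.List.pyIdx? n v).getD n
def mkP (vis : List Int) (j : Nat) : Prop := (vis[j]?).getD 1 ≠ 0
theorem vget_eq (vis : List Int) (v : Int) : vget vis v = (vis[toIx vis.length v]?).getD 1 := by
  unfold vget toIx PySem.List.pyGet?
  cases h : PySem.List.pyIdx? vis.length v with
  | none => simp
  | some k => simp

theorem vset_eq (vis : List Int) (v : Int) : vset vis v = vis.set (toIx vis.length v) 1 := by
  unfold vset toIx PySem.List.pySetD PySem.List.pySet?
  cases h : PySem.List.pyIdx? vis.length v with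
  | none => simp [List.set_eq_of_length_le (le_refl vis.length)]
  | some k => simp

theorem rowOf_eq (G : List (List Int)) (v : Int) : rowOf G v = (G[toIx G.length v]?).getD [] := by
  unfold rowOf toIx PySem.List.pyGet?
  cases h : PySem.List.pyIdx? G.length v with
  | none => simp
  | some k => simp

theorem toIx_natCast {n m : Nat} (h : m < n) : toIx n (m : Int) = m := by
  unfold toIx PySem.List.pyIdx?
  simp [h]

theorem mkP_out {vis : List Int} {j : Nat} (h : vis.length ≤ j) : mkP vis j := by
  simp [mkP, List.getElem?_eq_none h]

theorem vget_zero_iff (vis : List Int) (v : Int) :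
    vget vis v = 0 ↔ ¬ mkP vis (toIx vis.length v) := by
  rw [vget_eq]; unfold mkP; exact (not_ne_iff).symm

theorem vget_zero_lt {vis : List Int} {v : Int} (h : vget vis v = 0) :
    toIx vis.length v < vis.length := by
  rw [vget_eq] at h
  by_contra hc
  rw [List.getElem?_eq_none (Nat.le_of_not_lt hc)] at h
  simp at h

theorem mkP_set_mono {vis : List Int} {k j : Nat} (h : mkP vis j) : mkP (vis.set k 1) j := by
  unfold mkP at *
  by_cases hkj : k = j
  · subst hkj
    by_cases hk : k < vis.length
    · simp [hk]
    · rw [List.set_eq_of_length_le (Nat.le_of_not_lt hk)]; exact h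
  · rw [List.getElem?_set_ne hkj]; exact h

theorem mkP_set_self {vis : List Int} {k : Nat} (h : k < vis.length) : mkP (vis.set k 1) k := by
  unfold mkP
  simp [h]

theorem mkP_set_cases {vis : List Int} {k j : Nat} (h : mkP (vis.set k 1) j) :
    mkP vis j ∨ j = k := by
  by_cases hkj : k = j
  · right; omega
  · left; unfold mkP at *; rwa [List.getElem?_set_ne hkj] at h

theorem zeros_pos {vis : List Int} {j : Nat} (hj : j < vis.length) (h : ¬ mkP vis j) :
    0 < zeros vis := by
  unfold mkP at h
  rw [not_ne_iff] at h
  rw [List.getElem?_eq_getElem hj] at h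
  simp at h
  unfold zeros
  rw [List.countP_pos_iff]
  exact ⟨0, h ▸ List.getElem_mem hj, by simp⟩

theorem zeros_le_of_grows : ∀ (l l' : List Int), l'.length = l.length →
    (∀ j, mkP l j → mkP l' j) → zeros l' ≤ zeros l := by
  intro l
  induction l with
  | nil => intro l' hl _; rw [List.length_nil, List.length_eq_zero_iff] at hl; simp [hl]
  | cons a t ih =>
    intro l' hl h
    cases l' with
    | nil => simp at hl
    | cons b t' =>
      have htail : zeros t' ≤ zeros t := by
        refine ih t' (by simpa using hl) ?_
        intro j hj
        have := h (j+1) (by unfold mkP at *; simpa using hj)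
        unfold mkP at *; simpa using this
      have hhead : a ≠ 0 → b ≠ 0 := by
        intro ha
        have := h 0 (by unfold mkP; simpa using ha)
        unfold mkP at this; simpa using this
      simp only [zeros, List.countP_cons]
      unfold zeros at htail
      by_cases ha : a = 0
      · by_cases hb : b = 0 <;> simp [ha, hb] <;> omega
      · have hb := hhead ha
        simp [ha, hb]
        omega

theorem zeroOne_vset {vis : List Int} {v : Int} (h : ∀ x ∈ vis, x = 0 ∨ x = 1) :
    ∀ x ∈ vset vis v, x = 0 ∨ x = 1 := by
  rw [vset_eq]
  intro x hx
  rcases List.mem_or_eq_of_mem_set hx with hx' | rfl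
  · exact h x hx'
  · right; rfl

theorem mem_foldl_push (vis' : List Int) :
    ∀ (l init : List Int) (x : Int),
      (x ∈ l.foldl (fun st u => if vget vis' u = 0 then u :: st else st) init) ↔
        x ∈ init ∨ (x ∈ l ∧ vget vis' x = 0) := by
  intro l
  induction l with
  | nil => simp
  | cons u rest ih =>
    intro init x
    simp only [List.foldl_cons]
    by_cases hu : vget vis' u = 0
    · rw [if_pos hu, ih]
      constructor
      · rintro (h | h)
        · rcases List.mem_cons.mp h with rfl | h'
          · exact Or.inr ⟨List.mem_cons_self, hu⟩
          · exact Or.inl h'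
        · exact Or.inr ⟨List.mem_cons_of_mem _ h.1, h.2⟩
      · rintro (h | ⟨hm, hg⟩)
        · exact Or.inl (List.mem_cons_of_mem _ h)
        · rcases List.mem_cons.mp hm with rfl | h'
          · exact Or.inl List.mem_cons_self
          · exact Or.inr ⟨h', hg⟩
    · rw [if_neg hu, ih]
      constructor
      · rintro (h | h)
        · exact Or.inl h
        · exact Or.inr ⟨List.mem_cons_of_mem _ h.1, h.2⟩
      · rintro (h | ⟨hm, hg⟩)
        · exact Or.inl h
        · rcases List.mem_cons.mp hm with rfl | h'
          · exact absurd hg hu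
          · exact Or.inr ⟨h', hg⟩


theorem length_vset (vis : List Int) (v : Int) : (vset vis v).length = vis.length := by
  rw [vset_eq, List.length_set]

def zeroOne (vis : List Int) : Prop := ∀ x ∈ vis, x = 0 ∨ x = 1
def nbs (G : List (List Int)) (j : Nat) : List Nat := ((G[j]?).getD []).map (toIx G.length)
def ClosedW (G : List (List Int)) (W : Nat → Prop) : Prop :=
  ∀ j, j < G.length → W j → ∀ u ∈ nbs G j, W u

theorem mkP_of_vget_ne {vis : List Int} {v : Int} (h : vget vis v ≠ 0) :
    mkP vis (toIx vis.length v) :=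
  not_not.mp (fun hm => h ((vget_zero_iff vis v).mpr hm))

theorem markFrom_length (G : List (List Int)) : ∀ (vis stack : List Int),
    (markFrom G vis stack).length = vis.length := by
  intro vis stack
  induction vis, stack using markFrom.induct G with
  | case1 vis => rw [markFrom]
  | case2 vis v rest h ih =>
    simp only [dite_eq_ite] at ih
    rw [markFrom, if_pos h, ih, length_vset]
  | case3 vis v rest h ih => rw [markFrom, if_neg h]; exact ih

theorem markFrom_grows (G : List (List Int)) : ∀ (vis stack : List Int),
    ∀ j, mkP vis j → mkP (markFrom G vis stack) j := by
  intro vis stack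
  induction vis, stack using markFrom.induct G with
  | case1 vis => intro j hj; rw [markFrom]; exact hj
  | case2 vis v rest h ih =>
    intro j hj
    simp only [dite_eq_ite] at ih
    rw [markFrom, if_pos h]
    exact ih j (by rw [vset_eq]; exact mkP_set_mono hj)
  | case3 vis v rest h ih =>
    intro j hj; rw [markFrom, if_neg h]; exact ih j hj

theorem markFrom_marks (G : List (List Int)) : ∀ (vis stack : List Int),
    ∀ v ∈ stack, mkP (markFrom G vis stack) (toIx vis.length v) := by
  intro vis stack
  induction vis, stack using markFrom.induct G with
  | case1 vis => intro v hv; simp at hv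
  | case2 vis v rest h ih =>
    intro w hw
    simp only [dite_eq_ite] at ih
    rw [markFrom, if_pos h]
    rcases List.mem_cons.mp hw with rfl | hw'
    · refine markFrom_grows G _ _ _ ?_
      rw [vset_eq]
      exact mkP_set_self (vget_zero_lt h)
    · have hmem : w ∈ (rowOf G v).foldl
          (fun st u => if vget (vset vis v) u = 0 then u :: st else st) rest :=
        (mem_foldl_push _ _ _ _).mpr (Or.inl hw')
      have := ih w hmem
      rwa [length_vset] at this
  | case3 vis v rest h ih =>
    intro w hw
    rw [markFrom, if_neg h]
    rcases List.mem_cons.mp hw with rfl | hw'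
    · exact markFrom_grows G _ _ _ (mkP_of_vget_ne h)
    · exact ih w hw'

theorem markFrom_zeroOne (G : List (List Int)) : ∀ (vis stack : List Int),
    zeroOne vis → zeroOne (markFrom G vis stack) := by
  intro vis stack
  induction vis, stack using markFrom.induct G with
  | case1 vis => intro h01; rw [markFrom]; exact h01
  | case2 vis v rest h ih =>
    intro h01
    simp only [dite_eq_ite] at ih
    rw [markFrom, if_pos h]; exact ih (zeroOne_vset h01)
  | case3 vis v rest h ih =>
    intro h01; rw [markFrom, if_neg h]; exact ih h01

theorem markFrom_relClosed (G : List (List Int)) : ∀ (vis stack : List Int),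
    vis.length = G.length →
    ∀ j, j < G.length → mkP (markFrom G vis stack) j → ¬ mkP vis j →
      ∀ u ∈ nbs G j, mkP (markFrom G vis stack) u := by
  intro vis stack
  induction vis, stack using markFrom.induct G with
  | case1 vis =>
    intro hlen j hj hr hnv u hu
    rw [markFrom] at hr
    exact absurd hr hnv
  | case2 vis v rest h ih =>
    intro hlen j hj hr hnv u hu
    simp only [dite_eq_ite] at ih
    rw [markFrom, if_pos h] at hr ⊢
    by_cases hj' : mkP (vset vis v) j
    · have hjix : j = toIx vis.length v := by
        rcases mkP_set_cases (show mkP (vis.set (toIx vis.length v) 1) j by rwa [← vset_eq]) with hc | hc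
        · exact absurd hc hnv
        · exact hc
      have hGix : toIx G.length v = j := by rw [← hlen, ← hjix]
      unfold nbs at hu
      rcases List.mem_map.mp hu with ⟨u0, hu0, rfl⟩
      have hu0row : u0 ∈ rowOf G v := by rw [rowOf_eq, hGix]; exact hu0
      by_cases hpush : vget (vset vis v) u0 = 0
      · have hmem := (mem_foldl_push (vset vis v) (rowOf G v) rest u0).mpr (Or.inr ⟨hu0row, hpush⟩)
        have := markFrom_marks G (vset vis v) _ u0 hmem
        rwa [length_vset, hlen] at this
      · have hm := mkP_of_vget_ne hpush
        rw [length_vset, hlen] at hm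
        exact markFrom_grows G _ _ _ hm
    · exact ih (by rw [length_vset, hlen]) j hj hr hj' u hu
  | case3 vis v rest h ih =>
    intro hlen j hj hr hnv u hu
    rw [markFrom, if_neg h] at hr ⊢
    exact ih hlen j hj hr hnv u hu


theorem markFrom_subW (G : List (List Int)) (W : Nat → Prop) (hW : ClosedW G W) :
    ∀ (vis stack : List Int), vis.length = G.length →
    (∀ j, j < G.length → mkP vis j → W j) →
    (∀ v ∈ stack, toIx G.length v < G.length → W (toIx G.length v)) →
    ∀ j, j < G.length → mkP (markFrom G vis stack) j → W j := by
  intro vis stack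
  induction vis, stack using markFrom.induct G with
  | case1 vis =>
    intro hlen hvis hst j hj hr
    rw [markFrom] at hr
    exact hvis j hj hr
  | case2 vis v rest h ih =>
    intro hlen hvis hst j hj hr
    simp only [dite_eq_ite] at ih
    rw [markFrom, if_pos h] at hr
    have hixlt : toIx G.length v < G.length := by rw [← hlen]; exact vget_zero_lt h
    have hWv : W (toIx G.length v) := hst v List.mem_cons_self hixlt
    refine ih (by rw [length_vset, hlen]) ?_ ?_ j hj hr
    · intro j' hj' hm
      rcases mkP_set_cases (show mkP (vis.set (toIx vis.length v) 1) j' by rwa [← vset_eq]) with hc | hc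
      · exact hvis j' hj' hc
      · rw [hc, hlen]
        exact hWv
    · intro x hx hxlt
      rcases (mem_foldl_push (vset vis v) (rowOf G v) rest x).mp hx with hx' | ⟨hxrow, _⟩
      · exact hst x (List.mem_cons_of_mem _ hx') hxlt
      · refine hW (toIx G.length v) hixlt hWv (toIx G.length x) ?_
        unfold nbs
        refine List.mem_map.mpr ⟨x, ?_, rfl⟩
        rw [rowOf_eq] at hxrow
        exact hxrow
  | case3 vis v rest h ih =>
    intro hlen hvis hst j hj hr
    rw [markFrom, if_neg h] at hr
    exact ih hlen hvis (fun x hx => hst x (List.mem_cons_of_mem _ hx)) j hj hr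


theorem dfs_fold (G : List (List Int)) (fuel : Nat)
    (IH : ∀ (vis : List Int) (s : Int), vis.length = G.length → zeros vis ≤ fuel → vget vis s = 0 →
      (DFS_visitF G fuel vis s).length = G.length
      ∧ (∀ j, mkP vis j → mkP (DFS_visitF G fuel vis s) j)
      ∧ (zeroOne vis → zeroOne (DFS_visitF G fuel vis s))
      ∧ mkP (DFS_visitF G fuel vis s) (toIx G.length s)
      ∧ (∀ j, j < G.length → mkP (DFS_visitF G fuel vis s) j → ¬ mkP vis j →
          ∀ u ∈ nbs G j, mkP (DFS_visitF G fuel vis s) u)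
      ∧ (∀ W, ClosedW G W → (∀ j, j < G.length → mkP vis j → W j) →
          (toIx G.length s < G.length → W (toIx G.length s)) →
          ∀ j, j < G.length → mkP (DFS_visitF G fuel vis s) j → W j)) :
    ∀ (us vis : List Int), vis.length = G.length → zeros vis ≤ fuel →
      (us.foldl (fun vis u => if vget vis u = 0 then DFS_visitF G fuel vis u else vis) vis).length = G.length
      ∧ (∀ j, mkP vis j → mkP (us.foldl (fun vis u => if vget vis u = 0 then DFS_visitF G fuel vis u else vis) vis) j)
      ∧ (zeroOne vis → zeroOne (us.foldl (fun vis u => if vget vis u = 0 then DFS_visitF G fuel vis u else vis) vis))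
      ∧ (∀ u ∈ us, mkP (us.foldl (fun vis u => if vget vis u = 0 then DFS_visitF G fuel vis u else vis) vis) (toIx G.length u))
      ∧ (∀ j, j < G.length → mkP (us.foldl (fun vis u => if vget vis u = 0 then DFS_visitF G fuel vis u else vis) vis) j → ¬ mkP vis j →
          ∀ u ∈ nbs G j, mkP (us.foldl (fun vis u => if vget vis u = 0 then DFS_visitF G fuel vis u else vis) vis) u)
      ∧ (∀ W, ClosedW G W → (∀ j, j < G.length → mkP vis j → W j) →
          (∀ u ∈ us, toIx G.length u < G.length → W (toIx G.length u)) →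
          ∀ j, j < G.length → mkP (us.foldl (fun vis u => if vget vis u = 0 then DFS_visitF G fuel vis u else vis) vis) j → W j) := by
  intro us
  induction us with
  | nil =>
    intro vis hlen hz
    refine ⟨hlen, fun j hj => hj, fun h => h, by simp, ?_, ?_⟩
    · intro j hj hr hnv u hu
      exact absurd hr hnv
    · intro W hW hvis hus j hj hr
      exact hvis j hj hr
  | cons u rest ih =>
    intro vis hlen hz
    simp only [List.foldl_cons]
    by_cases hu : vget vis u = 0
    · rw [if_pos hu]
      obtain ⟨B1, B2, B3, B4, B5, B6⟩ := IH vis u hlen hz hu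
      have hz1 : zeros (DFS_visitF G fuel vis u) ≤ fuel :=
        le_trans (zeros_le_of_grows vis (DFS_visitF G fuel vis u) (by rw [B1, hlen]) B2) hz
      obtain ⟨R1, R2, R3, R4, R5, R6⟩ := ih (DFS_visitF G fuel vis u) B1 hz1
      refine ⟨R1, fun j hj => R2 j (B2 j hj), fun h => R3 (B3 h), ?_, ?_, ?_⟩
      · intro w hw
        rcases List.mem_cons.mp hw with rfl | hw'
        · exact R2 _ B4
        · exact R4 w hw'
      · intro j hj hr hnv w hw
        by_cases hm1 : mkP (DFS_visitF G fuel vis u) j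
        · exact R2 _ (B5 j hj hm1 hnv w hw)
        · exact R5 j hj hr hm1 w hw
      · intro W hW hvis hus j hj hr
        refine R6 W hW ?_ (fun w hw => hus w (List.mem_cons_of_mem _ hw)) j hj hr
        intro j' hj' hm
        exact B6 W hW hvis (hus u List.mem_cons_self) j' hj' hm
    · rw [if_neg hu]
      obtain ⟨R1, R2, R3, R4, R5, R6⟩ := ih vis hlen hz
      refine ⟨R1, R2, R3, ?_, R5, ?_⟩
      · intro w hw
        rcases List.mem_cons.mp hw with rfl | hw'
        · have := mkP_of_vget_ne hu
          rw [hlen] at this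
          exact R2 _ this
        · exact R4 w hw'
      · intro W hW hvis hus j hj hr
        exact R6 W hW hvis (fun w hw => hus w (List.mem_cons_of_mem _ hw)) j hj hr

theorem dfs_main (G : List (List Int)) : ∀ (fuel : Nat) (vis : List Int) (s : Int),
    vis.length = G.length → zeros vis ≤ fuel → vget vis s = 0 →
      (DFS_visitF G fuel vis s).length = G.length
      ∧ (∀ j, mkP vis j → mkP (DFS_visitF G fuel vis s) j)
      ∧ (zeroOne vis → zeroOne (DFS_visitF G fuel vis s))
      ∧ mkP (DFS_visitF G fuel vis s) (toIx G.length s)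
      ∧ (∀ j, j < G.length → mkP (DFS_visitF G fuel vis s) j → ¬ mkP vis j →
          ∀ u ∈ nbs G j, mkP (DFS_visitF G fuel vis s) u)
      ∧ (∀ W, ClosedW G W → (∀ j, j < G.length → mkP vis j → W j) →
          (toIx G.length s < G.length → W (toIx G.length s)) →
          ∀ j, j < G.length → mkP (DFS_visitF G fuel vis s) j → W j) := by
  intro fuel
  induction fuel with
  | zero =>
    intro vis s hlen hz h0
    have h1 := vget_zero_lt h0
    have h2 := (vget_zero_iff vis s).mp h0
    have := zeros_pos h1 h2
    omega
  | succ fuel ih =>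
    intro vis s hlen hz h0
    have hixv : toIx vis.length s < vis.length := vget_zero_lt h0
    have hixG : toIx G.length s = toIx vis.length s := by rw [hlen]
    have hset1 : (vset vis s).length = G.length := by rw [length_vset, hlen]
    have hset2 : zeros (vset vis s) ≤ fuel := by
      have := zeros_vset_lt vis s h0
      omega
    obtain ⟨R1, R2, R3, R4, R5, R6⟩ := dfs_fold G fuel ih (rowOf G s) (vset vis s) hset1 hset2
    have hgrow : ∀ j, mkP vis j → mkP (vset vis s) j := by
      intro j hj; rw [vset_eq]; exact mkP_set_mono hj
    have hself : mkP (vset vis s) (toIx G.length s) := by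
      rw [hixG, vset_eq]; exact mkP_set_self hixv
    have hrow : ∀ u0, u0 ∈ rowOf G s → toIx G.length u0 ∈ nbs G (toIx G.length s) := by
      intro u0 h
      unfold nbs
      rw [rowOf_eq] at h
      exact List.mem_map.mpr ⟨u0, h, rfl⟩
    rw [DFS_visitF]
    refine ⟨R1, fun j hj => R2 j (hgrow j hj), fun h => R3 (zeroOne_vset h), R2 _ hself, ?_, ?_⟩
    · intro j hj hr hnv u hu
      by_cases hm1 : mkP (vset vis s) j
      · have hjix : j = toIx vis.length s := by
          rcases mkP_set_cases (show mkP (vis.set (toIx vis.length s) 1) j by rwa [← vset_eq]) with hc | hc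
          · exact absurd hc hnv
          · exact hc
        unfold nbs at hu
        rcases List.mem_map.mp hu with ⟨u0, hu0, rfl⟩
        refine R4 u0 ?_
        rw [rowOf_eq, hixG, ← hjix]
        exact hu0
      · exact R5 j hj hr hm1 u hu
    · intro W hW hvis hs j hj hr
      have hWs : W (toIx G.length s) := hs (by rw [hixG, ← hlen]; exact hixv)
      refine R6 W hW ?_ ?_ j hj hr
      · intro j' hj' hm
        rcases mkP_set_cases (show mkP (vis.set (toIx vis.length s) 1) j' by rwa [← vset_eq]) with hc | hc
        · exact hvis j' hj' hc
        · rw [hc, ← hixG]; exact hWs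
      · intro u0 hu0 _
        exact hW (toIx G.length s) (by rw [hixG, ← hlen]; exact hixv) hWs _ (hrow u0 hu0)

theorem not_mkP_replicate {n j : Nat} (hj : j < n) : ¬ mkP (List.replicate n (0:Int)) j := by
  simp [mkP, hj]

theorem zeroOne_replicate (n : Nat) : zeroOne (List.replicate n (0:Int)) := by
  intro x hx
  left
  exact List.eq_of_mem_replicate hx

theorem eq_of_marks : ∀ (l1 l2 : List Int), l1.length = l2.length → zeroOne l1 → zeroOne l2 →
    (∀ j, mkP l1 j ↔ mkP l2 j) → l1 = l2 := by
  intro l1 l2 hlen h1 h2 h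
  apply List.ext_getElem hlen
  intro j hj1 hj2
  have m := h j
  unfold mkP at m
  rw [List.getElem?_eq_getElem hj1, List.getElem?_eq_getElem hj2] at m
  simp only [Option.getD_some] at m
  rcases h1 _ (List.getElem_mem hj1) with e1 | e1 <;>
    rcases h2 _ (List.getElem_mem hj2) with e2 | e2 <;>
      rw [e1, e2] at m ⊢ <;> first | rfl | simp at m

theorem phase_eq (G : List (List Int)) (vis : List Int) (s : Int)
    (hlen : vis.length = G.length) (h01 : zeroOne vis)
    (hcl : ClosedW G (mkP vis)) (h0 : vget vis s = 0) :
    DFS_visitF G G.length vis s = markFrom G vis [s]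
      ∧ (markFrom G vis [s]).length = G.length
      ∧ zeroOne (markFrom G vis [s])
      ∧ ClosedW G (mkP (markFrom G vis [s])) := by
  have hz : zeros vis ≤ G.length := le_trans List.countP_le_length (le_of_eq hlen)
  obtain ⟨A1, A2, A3, A4, A5, A6⟩ := dfs_main G G.length vis s hlen hz h0
  have B1 : (markFrom G vis [s]).length = G.length := by rw [markFrom_length, hlen]
  have B2 := markFrom_grows G vis [s]
  have B3 := markFrom_zeroOne G vis [s] h01
  have B4 : mkP (markFrom G vis [s]) (toIx G.length s) := by
    have := markFrom_marks G vis [s] s List.mem_cons_self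
    rwa [hlen] at this
  have B5 := markFrom_relClosed G vis [s] hlen
  have BC : ClosedW G (mkP (markFrom G vis [s])) := by
    intro j hj hm u hu
    by_cases hv : mkP vis j
    · exact B2 _ (hcl j hj hv u hu)
    · exact B5 j hj hm hv u hu
  have AC : ClosedW G (mkP (DFS_visitF G G.length vis s)) := by
    intro j hj hm u hu
    by_cases hv : mkP vis j
    · exact A2 _ (hcl j hj hv u hu)
    · exact A5 j hj hm hv u hu
  have hiff : ∀ j, mkP (DFS_visitF G G.length vis s) j ↔ mkP (markFrom G vis [s]) j := by
    intro j
    by_cases hj : j < G.length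
    · constructor
      · intro hm
        exact A6 (mkP (markFrom G vis [s])) BC (fun j' _ hv => B2 _ hv) (fun _ => B4) j hj hm
      · intro hm
        refine markFrom_subW G (mkP (DFS_visitF G G.length vis s)) AC vis [s] hlen
          (fun j' _ hv => A2 _ hv) ?_ j hj hm
        intro v hv _
        rcases List.mem_cons.mp hv with rfl | hf
        · exact A4
        · simp at hf
    · exact iff_of_true (mkP_out (by rw [A1]; omega)) (mkP_out (by rw [B1]; omega))
  exact ⟨eq_of_marks _ _ (by rw [A1, B1]) (A3 h01) B3 hiff, B1, B3, BC⟩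

def InvP (G : List (List Int)) (p : Int × List Int) : Prop :=
  p.2.length = G.length ∧ zeroOne p.2 ∧ ClosedW G (mkP p.2)
    ∧ ∃ m : Nat, p.1 = (m : Int) ∧ m < G.length

theorem loop_eq (G : List (List Int)) :
    ∀ (l : List Nat), (∀ x ∈ l, x < G.length) → ∀ (p : Int × List Int), InvP G p →
      l.foldl (fun (p : Int × List Int) (i : Nat) =>
          if vget p.2 (i : Int) = 0 then (((i : Nat) : Int), DFS_visitF G G.length p.2 (i : Int)) else p) p
        = l.foldl (fun (p : Int × List Int) (i : Nat) =>
          if vget p.2 (i : Int) = 0 then (((i : Nat) : Int), markFrom G p.2 [(i : Int)]) else p) p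
      ∧ InvP G (l.foldl (fun (p : Int × List Int) (i : Nat) =>
          if vget p.2 (i : Int) = 0 then (((i : Nat) : Int), DFS_visitF G G.length p.2 (i : Int)) else p) p) := by
  intro l
  induction l with
  | nil => intro _ p hp; exact ⟨rfl, hp⟩
  | cons i rest ih =>
    intro hl p hp
    obtain ⟨hlen, h01, hcl, hk⟩ := hp
    simp only [List.foldl_cons]
    by_cases hv : vget p.2 (i : Int) = 0
    · simp only [if_pos hv]
      obtain ⟨heq, hBlen, hB01, hBC⟩ := phase_eq G p.2 (i : Int) hlen h01 hcl hv
      rw [heq]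
      exact ih (fun x hx => hl x (List.mem_cons_of_mem _ hx)) ((i : Int), markFrom G p.2 [(i : Int)])
        ⟨hBlen, hB01, hBC, ⟨i, rfl, hl i List.mem_cons_self⟩⟩
    · simp only [if_neg hv]
      exact ih (fun x hx => hl x (List.mem_cons_of_mem _ hx)) p ⟨hlen, h01, hcl, hk⟩

theorem loopNone_eq : ∀ (vis : List Int) (k : Int),
    loopNone vis k = if vis.contains 0 then none else some k := by
  intro vis k
  induction vis with
  | nil => simp [loopNone]
  | cons x rest ih =>
    by_cases hx : x = 0
    · subst hx; simp [loopNone]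
    · rw [loopNone, if_neg hx, ih]
      have : ((x :: rest).contains 0) = (rest.contains 0) := by
        simp [Ne.symm hx]
      rw [this]

-- ===== VERDICT (by name: the statement is the Claim_ definition above) =====
theorem good_beginning_spec : Claim_equal_good_beginning := by
  unfold Claim_equal_good_beginning
  intro G _ hpre
  unfold Spec_good_beginning good_beginning good_beginning_alt
  have hn : 0 < G.length := by
    cases G with
    | nil => exact absurd rfl hpre.1
    | cons a t => simp
  have hInv0 : InvP G ((0 : Int), List.replicate G.length (0 : Int)) := by
    refine ⟨by simp, zeroOne_replicate _, ?_, ⟨0, rfl, hn⟩⟩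
    intro j hj hm u hu
    exact absurd hm (not_mkP_replicate hj)
  obtain ⟨hfold, hInv⟩ := loop_eq G (List.range G.length)
    (fun x hx => List.mem_range.mp hx) _ hInv0
  simp only []
  rw [← hfold]
  obtain ⟨hslen, hs01, hscl, m, hm, hmlt⟩ := hInv
  have hvk : vget (List.replicate G.length (0 : Int))
      ((List.range G.length).foldl (fun (p : Int × List Int) (i : Nat) =>
        if vget p.2 (i : Int) = 0 then (((i : Nat) : Int), DFS_visitF G G.length p.2 (i : Int)) else p)
        ((0 : Int), List.replicate G.length (0 : Int))).1 = 0 := by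
    rw [hm, vget_eq, List.length_replicate, toIx_natCast hmlt]
    simp [hmlt]
  obtain ⟨heq2, _, _, _⟩ := phase_eq G (List.replicate G.length (0 : Int)) _
    (by simp) (zeroOne_replicate _)
    (fun j hj hmk u hu => absurd hmk (not_mkP_replicate hj)) hvk
  rw [heq2, loopNone_eq]
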